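-- pv_equiv track=rewrite | github.com/siddharth2016/problem-solving-deprecated | Hackerrank/lucky_days.py | solve
-- ===== SOURCE A (Python) =====
-- def solve(arr, n):
--     i = j = n-1
--     count = 0
--     while(i>=0):
--         if (arr[i]>=arr[j]):
--             j = i
--             count += 1
--
--         i -= 1
--
--     return count
-- ===== SOURCE B (Python) =====
-- def solve(arr, n):
--     if n <= 0:
--         return 0
--     seg = arr[:n]
--     m = len(seg)
--     if m == 0:
--         return 0
--     suffix = [0] * m
--     suffix[m - 1] = seg[m - 1]
--     for i in range(m - 2, -1, -1):
--         suffix[i] = max(seg[i], suffix[i + 1])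
--     return sum(1 for i in range(m) if seg[i] >= suffix[i])
-- ===== Notes on version B (the rewrite author's own statement) =====
-- stated objective: alternative
-- what changed: Replaces A's single right-to-left scan that tracks the index of the last record with a two-pass decomposition: first build a suffix-maximum table, then count positions where the element reaches its suffix maximum.
import Mathlib
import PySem

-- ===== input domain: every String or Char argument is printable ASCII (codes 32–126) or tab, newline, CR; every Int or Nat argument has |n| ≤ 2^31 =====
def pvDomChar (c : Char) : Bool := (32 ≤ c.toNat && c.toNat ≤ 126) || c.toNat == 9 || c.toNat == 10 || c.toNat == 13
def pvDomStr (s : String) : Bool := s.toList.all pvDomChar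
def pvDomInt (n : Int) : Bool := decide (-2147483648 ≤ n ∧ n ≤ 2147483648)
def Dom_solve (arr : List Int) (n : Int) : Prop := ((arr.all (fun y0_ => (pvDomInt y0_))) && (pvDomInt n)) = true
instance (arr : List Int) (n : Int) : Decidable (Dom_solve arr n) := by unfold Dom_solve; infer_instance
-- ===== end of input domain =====

-- B replaces A's single right-to-left record scan (tracking the last record index j)
-- by a two-pass decomposition: build a suffix-maximum table, then count positions
-- reaching their suffix maximum. Alternative decomposition, same O(n) cost.

-- ===== PORT A =====
-- A's while loop; arr[i]/arr[j] via pyGet? (getD 0 is never the raising case inside Pre_solve)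
def solveGo (arr : List Int) (i j count : Int) : Int :=
  if _h : 0 ≤ i then
    if (PySem.List.pyGet? arr i).getD 0 ≥ (PySem.List.pyGet? arr j).getD 0 then
      solveGo arr (i - 1) i (count + 1)
    else
      solveGo arr (i - 1) j count
  else count
termination_by (i + 1).toNat
decreasing_by all_goals omega

def solve (arr : List Int) (n : Int) : Int := solveGo arr (n - 1) (n - 1) 0

-- ===== PORT B =====
-- the backward fill suffix[i] = max(seg[i], suffix[i+1]) as structural recursion
def suffixMaxes : List Int → List Int
  | [] => []
  | x :: rest =>
    match suffixMaxes rest with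
    | [] => [x]
    | s :: ss => max x s :: s :: ss

-- sum(1 for i in range(m) if seg[i] >= suffix[i]) — the two lists walked in step
def countGe : List Int → List Int → Int
  | x :: xs, s :: ss => (if x ≥ s then 1 else 0) + countGe xs ss
  | _, _ => 0

def solve_alt (arr : List Int) (n : Int) : Int :=
  if n ≤ 0 then 0
  else
    let seg := PySem.List.slice arr none (some n)
    countGe seg (suffixMaxes seg)

-- ===== PRECONDITION & SPEC =====
-- Pre_ excludes exactly the inputs where A raises IndexError (n exceeds len(arr)).
def Pre_solve (arr : List Int) (n : Int) : Prop := n ≤ (arr.length : Int)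
instance (arr : List Int) (n : Int) : Decidable (Pre_solve arr n) := by
  unfold Pre_solve; infer_instance

def pvWitness_solve : List Int × Int := ([3, 1, 2], 3)

def Spec_solve (arr : List Int) (n : Int) (out : Int) : Prop := out = solve_alt arr n
instance (arr : List Int) (n : Int) (out : Int) : Decidable (Spec_solve arr n out) := by
  unfold Spec_solve; infer_instance

-- ===== CLAIM =====
def Claim_equal_solve : Prop :=
  ∀ (arr : List Int) (n : Int), Dom_solve arr n → Pre_solve arr n → Spec_solve arr n (solve arr n)

-- ===== LEMMAS AND PROOFS =====

-- right-to-left record count with running maximum M (A's loop, with the value of arr[j] abstracted)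
def recCount : List Int → Int → Int
  | [], _ => 0
  | x :: rest, M => (if x ≥ M then 1 else 0) + recCount rest (max M x)

-- same count stated positionally on the un-reversed list, with seed M
def specCountM : List Int → Int → Int
  | [], _ => 0
  | x :: rest, M => (if x ≥ max M (rest.foldl max x) then 1 else 0) + specCountM rest M

-- the common specification: count elements reaching the maximum of their suffix
def specCount : List Int → Int
  | [] => 0
  | x :: rest => (if x ≥ rest.foldl max x then 1 else 0) + specCount rest

theorem maxFold (l : List Int) : ∀ a b, max a (l.foldl max b) = l.foldl max (max a b) := by
  induction l with
  | nil => intro a b; rfl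
  | cons x l ih =>
    intro a b
    simp only [List.foldl_cons]
    rw [ih a (max b x)]
    congr 1
    rw [max_assoc]

theorem seed_le_foldlMax (l : List Int) : ∀ b, b ≤ l.foldl max b := by
  induction l with
  | nil => intro b; simp [List.foldl]
  | cons x l ih =>
    intro b
    simp only [List.foldl_cons]
    exact le_trans (le_max_left b x) (ih (max b x))

theorem mem_le_foldlMax (l : List Int) : ∀ a b, a ∈ l → a ≤ l.foldl max b := by
  induction l with
  | nil => intro a b h; simp at h
  | cons x l ih =>
    intro a b h
    simp only [List.foldl_cons]
    rcases List.mem_cons.mp h with h | h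
    · subst h
      exact le_trans (le_max_right b a) (seed_le_foldlMax l (max b a))
    · exact ih a (max b x) h

theorem le_foldlMax_iff (l : List Int) : ∀ b x, l.foldl max b ≤ x ↔ (b ≤ x ∧ ∀ a ∈ l, a ≤ x) := by
  induction l with
  | nil => intro b x; simp [List.foldl]
  | cons y l ih =>
    intro b x
    simp only [List.foldl_cons, ih, max_le_iff, List.forall_mem_cons]
    tauto

theorem foldl_reverse_max (l : List Int) : ∀ M, l.reverse.foldl max M = l.foldl max M := by
  induction l with
  | nil => intro M; rfl
  | cons x l ih =>
    intro M
    simp only [List.reverse_cons, List.foldl_append, List.foldl_cons, List.foldl_nil, ih]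
    rw [max_comm (l.foldl max M) x, maxFold, max_comm x M]

theorem recCount_append_one (l : List Int) :
    ∀ x M, recCount (l ++ [x]) M = recCount l M + (if x ≥ l.foldl max M then 1 else 0) := by
  induction l with
  | nil => intro x M; simp only [List.nil_append, recCount, List.foldl_nil]; omega
  | cons y l ih =>
    intro x M
    simp only [List.cons_append, recCount, List.foldl_cons, ih]
    omega

theorem recCount_reverse (l : List Int) : ∀ M, recCount l.reverse M = specCountM l M := by
  induction l with
  | nil => intro M; rfl
  | cons x l ih =>
    intro M
    simp only [List.reverse_cons, recCount_append_one, foldl_reverse_max, ih, specCountM]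
    have hiff : (x ≥ l.foldl max M) ↔ (x ≥ max M (l.foldl max x)) := by
      constructor
      · intro h
        rcases (le_foldlMax_iff l M x).mp h with ⟨h1, h2⟩
        exact max_le h1 ((le_foldlMax_iff l x x).mpr ⟨le_refl x, h2⟩)
      · intro h
        rcases max_le_iff.mp h with ⟨h1, h2⟩
        rcases (le_foldlMax_iff l x x).mp h2 with ⟨_, h3⟩
        exact (le_foldlMax_iff l M x).mpr ⟨h1, h3⟩
    rw [if_congr hiff rfl rfl]
    omega

theorem specCountM_getLast : ∀ (l : List Int) (h : l ≠ []),
    specCountM l (l.getLast h) = specCount l := by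
  intro l
  induction l with
  | nil => intro h; exact absurd rfl h
  | cons x rest ih =>
    intro _
    cases rest with
    | nil => simp [specCountM, specCount, List.getLast]
    | cons y t =>
      rw [List.getLast_cons (by simp)]
      have hne : y :: t ≠ [] := by simp
      have hmem : (y :: t).getLast hne ∈ y :: t := List.getLast_mem hne
      have e1 : specCountM (x :: y :: t) ((y :: t).getLast hne) =
          (if x ≥ max ((y :: t).getLast hne) ((y :: t).foldl max x) then 1 else 0) +
            specCountM (y :: t) ((y :: t).getLast hne) := rfl
      have e2 : specCount (x :: y :: t) =
          (if x ≥ (y :: t).foldl max x then 1 else 0) + specCount (y :: t) := rfl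
      rw [e1, e2, ih hne]
      congr 1
      have hMle : (y :: t).getLast hne ≤ (y :: t).foldl max x :=
        mem_le_foldlMax (y :: t) _ x hmem
      have hcond : (x ≥ max ((y :: t).getLast hne) ((y :: t).foldl max x)) ↔
          (x ≥ (y :: t).foldl max x) := by
        constructor
        · intro h; exact le_trans (le_max_right _ _) h
        · intro h; exact max_le (le_trans hMle h) h
      rw [if_congr hcond rfl rfl]

theorem solveGo_eq_recCount (arr : List Int) :
    ∀ (m : Nat), m ≤ arr.length → ∀ j c,
      solveGo arr ((m : Int) - 1) j c =
        c + recCount ((arr.take m).reverse) ((PySem.List.pyGet? arr j).getD 0) := by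
  intro m
  induction m with
  | zero =>
    intro _ j c
    rw [solveGo]
    norm_num [recCount]
  | succ m ih =>
    intro hm j c
    have hmlt : m < arr.length := by omega
    have hcast : ((m + 1 : Nat) : Int) - 1 = (m : Int) := by push_cast; ring
    rw [hcast, solveGo, dif_pos (by positivity : (0:Int) ≤ (m:Int))]
    have hg : (PySem.List.pyGet? arr (m : Int)).getD 0 = arr[m] := by
      simp [List.getElem?_eq_getElem hmlt]
    have htake : (arr.take (m + 1)).reverse = arr[m] :: (arr.take m).reverse := by
      rw [List.take_succ]
      simp [List.getElem?_eq_getElem hmlt]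
    rw [htake]
    simp only [recCount, hg]
    split_ifs with hc
    · rw [ih (by omega) (m : Int) (c + 1), hg,
        max_eq_right hc]
      omega
    · rw [ih (by omega) j c, max_eq_left (le_of_lt (lt_of_not_ge hc))]
      omega

theorem suffixMaxes_cons (y : Int) (l : List Int) :
    suffixMaxes (y :: l) = (l.foldl max y) :: suffixMaxes l := by
  induction l generalizing y with
  | nil => rfl
  | cons z l ih =>
    show (match suffixMaxes (z :: l) with
          | [] => [y]
          | s :: ss => max y s :: s :: ss) = _
    rw [ih z]
    simp only [List.foldl_cons]
    rw [maxFold]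

theorem countGe_suffixMaxes (seg : List Int) : countGe seg (suffixMaxes seg) = specCount seg := by
  induction seg with
  | nil => rfl
  | cons x rest ih =>
    rw [suffixMaxes_cons]
    simp only [countGe, specCount, ih]

-- ===== VERDICT =====
theorem solve_spec : Claim_equal_solve := by
  intro arr n _ hpre
  unfold Spec_solve solve solve_alt
  by_cases hn : n ≤ 0
  · rw [solveGo, dif_neg (by omega), if_pos hn]
  · rw [if_neg hn]
    have hmn : ((n.toNat : Nat) : Int) = n := Int.toNat_of_nonneg (by omega)
    have hmle : n.toNat ≤ arr.length := by
      unfold Pre_solve at hpre; omega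
    have hm1 : 1 ≤ n.toNat := by omega
    have hseg : PySem.List.slice arr none (some n) = arr.take n.toNat := by
      conv_lhs => rw [← hmn]
      rw [PySem.List.slice_to_natCast]
    simp only [hseg, countGe_suffixMaxes]
    rw [show n - 1 = ((n.toNat : Nat) : Int) - 1 by omega]
    rw [solveGo_eq_recCount arr n.toNat hmle]
    have hne : arr.take n.toNat ≠ [] :=
      List.ne_nil_of_length_pos (by rw [List.length_take]; omega)
    have hg : (PySem.List.pyGet? arr (((n.toNat : Nat) : Int) - 1)).getD 0 =
        (arr.take n.toNat).getLast hne := by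
      rw [show ((n.toNat : Nat) : Int) - 1 = ((n.toNat - 1 : Nat) : Int) by omega,
        PySem.List.pyGet?_natCast, List.getLast_eq_getElem]
      have hlen : (arr.take n.toNat).length = n.toNat := by
        simp [List.length_take]; omega
      simp [List.getElem?_eq_getElem (show n.toNat - 1 < arr.length by omega), hlen,
        List.getElem_take]
    rw [hg, recCount_reverse, specCountM_getLast _ hne]
    omega
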